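-- pv_equiv track=rewrite | github.com/bhanugudheniya/Python-Program-Directory | Assignment 4 Theory/LongestSubstringFromAGivenString.py | largestSubstr1
-- ===== SOURCE A (Python) =====
-- def getEndingIndex(str1, n, i):
-- 	i += 1
-- 	while (i < n):
--
-- 		curr = str1[i]
-- 		prev = str1[i - 1]
-- 		if ((curr == 'a' and prev == 'z') or
-- 				(ord(curr) - ord(prev) == 1)):
-- 			i += 1
-- 		else:
-- 			break
--
-- 	return i - 1
--
-- def largestSubstr1(str1, n):
-- 	Len = 0
--
-- 	i = 0
-- 	while (i < n):
-- 		end = getEndingIndex(str1, n, i)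
-- 		Len = max(end - i + 1, Len)
-- 		i = end + 1
--
-- 	return Len
-- ===== SOURCE B (Python) =====
-- def largestSubstr1(str1, n):
--     Len = 0
--     curr = 0
--     for i in range(n):
--         c = str1[i]
--         if i > 0 and ((c == 'a' and str1[i - 1] == 'z') or
--                       ord(c) - ord(str1[i - 1]) == 1):
--             curr += 1
--         else:
--             curr = 1
--         Len = max(Len, curr)
--     return Len
-- ===== Notes on version B (the rewrite author's own statement) =====
-- stated objective: simpler
-- what changed: Replaces the helper getEndingIndex and its jump-to-end-of-streak outer loop by one flat pass that maintains a running streak counter and the best length. Pre_ excludes inputs with n > len(str1): there A raises IndexError except when len(str1)=0 and n=1, where A never indexes and returns 1 while B's pass indexes str1[0] and raises.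
-- outside the precondition, e.g. on largestSubstr1('', 1): A returns 1, B raises IndexError
import Mathlib
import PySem

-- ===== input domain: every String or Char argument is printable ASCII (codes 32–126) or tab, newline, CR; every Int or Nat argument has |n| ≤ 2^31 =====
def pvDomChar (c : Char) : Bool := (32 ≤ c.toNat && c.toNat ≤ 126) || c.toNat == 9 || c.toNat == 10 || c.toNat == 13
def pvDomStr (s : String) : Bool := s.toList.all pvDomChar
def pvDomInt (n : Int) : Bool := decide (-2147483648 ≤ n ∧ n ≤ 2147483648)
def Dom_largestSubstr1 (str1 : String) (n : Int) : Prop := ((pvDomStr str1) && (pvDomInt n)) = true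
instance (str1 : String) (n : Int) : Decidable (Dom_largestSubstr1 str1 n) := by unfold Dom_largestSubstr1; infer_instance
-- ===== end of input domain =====

-- B replaces A's helper-with-jump (find the end of each consecutive streak, then jump past it)
-- by a single flat pass with a running streak counter; same cost, plainly simpler.
-- Pre_ excludes n > len(str1): there A raises IndexError, except when len(str1) = 0 and n = 1,
-- where A returns 1 without ever indexing while B indexes str1[0] and raises.

-- ===== PORT A =====
-- the 'while i < n' loop inside getEndingIndex (fuel = remaining iteration bound, only a
-- totality guard: it never runs out on the fuel the callers pass)
def getEndingIndexGo (str1 : String) (n : Int) : Nat → Int → Int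
  | 0, i => i - 1
  | fuel + 1, i =>
    if i < n then
      let curr := (PySem.Str.pyGet? str1 i).getD ' '
      let prev := (PySem.Str.pyGet? str1 (i - 1)).getD ' '
      if (curr == 'a' && prev == 'z') || ((curr.toNat : Int) - (prev.toNat : Int) == 1) then
        getEndingIndexGo str1 n fuel (i + 1)
      else i - 1
    else i - 1

def getEndingIndex (str1 : String) (n : Int) (i : Int) : Int :=
  getEndingIndexGo str1 n (n - i).toNat (i + 1)

-- the 'while i < n' loop of largestSubstr1 (fuel likewise only a totality guard)
def largestSubstr1Go (str1 : String) (n : Int) : Nat → Int → Int → Int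
  | 0, _, Len => Len
  | fuel + 1, i, Len =>
    if i < n then
      let e := getEndingIndex str1 n i
      largestSubstr1Go str1 n fuel (e + 1) (max (e - i + 1) Len)
    else Len

def largestSubstr1 (str1 : String) (n : Int) : Int :=
  largestSubstr1Go str1 n n.toNat 0 0

-- ===== PORT B =====
-- the body of Source B's 'for i in range(n)' loop; state = (Len, curr)
def bStep (str1 : String) (st : Int × Int) (i : Int) : Int × Int :=
  let c := (PySem.Str.pyGet? str1 i).getD ' '
  let p := (PySem.Str.pyGet? str1 (i - 1)).getD ' '
  let curr := if 0 < i && ((c == 'a' && p == 'z') || ((c.toNat : Int) - (p.toNat : Int) == 1))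
              then st.2 + 1 else 1
  (max st.1 curr, curr)

def largestSubstr1_alt (str1 : String) (n : Int) : Int :=
  ((PySem.List.pyRange 0 n 1).foldl (bStep str1) (0, 0)).1

-- ===== PRECONDITION & SPEC =====
-- Pre_ excludes n > len(str1): there A raises IndexError, except the single corner
-- len(str1) = 0, n = 1 where A returns 1 but B raises (see header).
def Pre_largestSubstr1 (str1 : String) (n : Int) : Prop := n ≤ PySem.Str.len str1
instance (str1 : String) (n : Int) : Decidable (Pre_largestSubstr1 str1 n) := by
  unfold Pre_largestSubstr1; infer_instance
def pvWitness_largestSubstr1 : String × Int := ("abcxza", 6)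
def Spec_largestSubstr1 (str1 : String) (n : Int) (out : Int) : Prop := out = largestSubstr1_alt str1 n
instance (str1 : String) (n : Int) (out : Int) : Decidable (Spec_largestSubstr1 str1 n out) := by unfold Spec_largestSubstr1; infer_instance

-- ===== CLAIM (what is proved, stated in full; the proofs are below) =====
def Claim_equal_largestSubstr1 : Prop := ∀ (str1 : String) (n : Int), Dom_largestSubstr1 str1 n → Pre_largestSubstr1 str1 n → Spec_largestSubstr1 str1 n (largestSubstr1 str1 n)

-- ===== LEMMAS AND PROOFS =====

-- the streak-step condition both programs test between positions i-1 and i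
def cnd (str1 : String) (i : Int) : Bool :=
  let c := (PySem.Str.pyGet? str1 i).getD ' '
  let p := (PySem.Str.pyGet? str1 (i - 1)).getD ' '
  (c == 'a' && p == 'z') || ((c.toNat : Int) - (p.toNat : Int) == 1)

theorem geiGo_stop (str1 : String) (n : Int) :
    ∀ (f : Nat) (i : Int), ¬ i < n → getEndingIndexGo str1 n f i = i - 1 := by
  intro f i h
  cases f <;> simp [getEndingIndexGo, h]

theorem lsGo_stop (str1 : String) (n : Int) :
    ∀ (f : Nat) (i Len : Int), ¬ i < n → largestSubstr1Go str1 n f i Len = Len := by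
  intro f i Len h
  cases f <;> simp [largestSubstr1Go, h]

-- the helper's result does not depend on the fuel, as long as it covers the remaining iterations
theorem geiGo_congr (str1 : String) (n : Int) :
    ∀ (f1 f2 : Nat) (i : Int), (n - i).toNat ≤ f1 → (n - i).toNat ≤ f2 →
      getEndingIndexGo str1 n f1 i = getEndingIndexGo str1 n f2 i := by
  intro f1
  induction f1 with
  | zero =>
    intro f2 i h1 h2
    have h : ¬ i < n := by omega
    rw [geiGo_stop str1 n 0 i h, geiGo_stop str1 n f2 i h]
  | succ f ih =>
    intro f2 i h1 h2
    by_cases hin : i < n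
    · obtain ⟨g, rfl⟩ : ∃ g, f2 = g + 1 := by
        cases f2 with
        | zero => exact absurd h2 (by omega)
        | succ g => exact ⟨g, rfl⟩
      simp only [getEndingIndexGo, hin, if_true]
      split
      · exact ih g (i + 1) (by omega) (by omega)
      · rfl
    · rw [geiGo_stop str1 n _ i hin, geiGo_stop str1 n _ i hin]

-- the helper entered at position j, with its canonical fuel
def gE (str1 : String) (n j : Int) : Int :=
  getEndingIndexGo str1 n ((n - j).toNat + 1) j

theorem gE_eq (str1 : String) (n j : Int) :
    gE str1 n j = if j < n then (if cnd str1 j then gE str1 n (j + 1) else j - 1)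
                  else j - 1 := by
  by_cases hjn : j < n
  · show getEndingIndexGo str1 n ((n - j).toNat + 1) j = _
    simp only [getEndingIndexGo, cnd, hjn, if_true]
    split
    · exact geiGo_congr str1 n _ _ (j + 1) (by omega) (by omega)
    · rfl
  · rw [gE, geiGo_stop str1 n _ j hjn, if_neg hjn]

theorem getEndingIndex_eq_gE (str1 : String) (n i : Int) :
    getEndingIndex str1 n i = gE str1 n (i + 1) :=
  geiGo_congr str1 n _ _ (i + 1) (by omega) (by omega)

-- recursive form of B's fold
def bLoop (str1 : String) (n i Len curr : Int) : Int :=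
  if _h : i < n then
    let st := bStep str1 (Len, curr) i
    bLoop str1 n (i + 1) st.1 st.2
  else Len
termination_by (n - i).toNat
decreasing_by omega

theorem bLoop_eq (str1 : String) (n i Len curr : Int) :
    bLoop str1 n i Len curr =
      if i < n then
        (let c := if 0 < i && cnd str1 i then curr + 1 else 1
         bLoop str1 n (i + 1) (max Len c) c)
      else Len := by
  rw [bLoop]
  simp only [bStep, cnd]
  split <;> rfl

theorem foldl_bStep_eq (str1 : String) (n : Int) :
    ∀ (g : Nat) (i Len curr : Int), (n - i).toNat ≤ g →
      ((PySem.List.pyRange i n 1).foldl (bStep str1) (Len, curr)).1 = bLoop str1 n i Len curr := by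
  intro g
  induction g with
  | zero =>
    intro i Len curr hg
    rw [PySem.List.pyRange_one_eq_nil (by omega), bLoop_eq]
    simp [show ¬ i < n by omega]
  | succ g ih =>
    intro i Len curr hg
    rw [bLoop_eq]
    by_cases h : i < n
    · rw [PySem.List.pyRange_one_cons h]
      simp only [h, if_true, List.foldl_cons]
      have hb : bStep str1 (Len, curr) i
          = (max Len (if 0 < i && cnd str1 i then curr + 1 else 1),
             if 0 < i && cnd str1 i then curr + 1 else 1) := rfl
      rw [hb, ih (i + 1) _ _ (by omega)]
    · rw [PySem.List.pyRange_one_eq_nil (by omega)]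
      simp [h]

-- one streak: B's pass from position j with running counter k matches A resuming after the
-- streak the helper finishes scanning
theorem inner (str1 : String) (n : Int) (F : Nat)
    (HM : ∀ (j Len c : Int), (n - j).toNat ≤ F → 0 < j → cnd str1 j = false →
            largestSubstr1Go str1 n F j Len = bLoop str1 n j Len c) :
    ∀ (g : Nat) (j k Len : Int), g ≤ F → (n - j).toNat ≤ g → 0 < j →
      bLoop str1 n j (max Len k) k =
        largestSubstr1Go str1 n F (gE str1 n j + 1)
          (max (gE str1 n j - j + k + 1) Len) := by
  intro g
  induction g with
  | zero =>
    intro j k Len _ hg hj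
    have hjn : ¬ j < n := by omega
    rw [gE_eq, if_neg hjn, bLoop_eq, if_neg hjn,
        lsGo_stop str1 n F (j - 1 + 1) _ (by omega)]
    have hk : j - 1 - j + k + 1 = k := by omega
    rw [hk, max_comm]
  | succ g ih =>
    intro j k Len hgF hg hj
    by_cases hjn : j < n
    · rw [gE_eq, if_pos hjn]
      by_cases hc : cnd str1 j = true
      · -- streak continues
        have hg2 : (decide (0 < j) && cnd str1 j) = true := by simp [hj, hc]
        have hmax : max (max Len k) (k + 1) = max Len (k + 1) := by omega
        rw [bLoop_eq, if_pos hjn, if_pos hg2, if_pos hc]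
        show bLoop str1 n (j + 1) (max (max Len k) (k + 1)) (k + 1)
            = largestSubstr1Go str1 n F (gE str1 n (j + 1) + 1)
                (max (gE str1 n (j + 1) - j + k + 1) Len)
        rw [hmax, ih (j + 1) (k + 1) Len (by omega) (by omega) (by omega)]
        have harg : gE str1 n (j + 1) - (j + 1) + (k + 1) + 1
            = gE str1 n (j + 1) - j + k + 1 := by omega
        rw [harg]
      · -- streak breaks at j: A resumes its outer loop at j
        have hc' : cnd str1 j = false := by simpa using hc
        simp only [hc', Bool.false_eq_true, if_false]
        have h1 : j - 1 + 1 = j := by omega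
        have h2 : j - 1 - j + k + 1 = k := by omega
        have hg2 : (decide (0 < j) && cnd str1 j) = false := by simp [hc']
        have hbl : bLoop str1 n j (max Len k) k
            = bLoop str1 n (j + 1) (max (max Len k) 1) 1 := by
          rw [bLoop_eq, if_pos hjn]
          simp only [hg2, Bool.false_eq_true, if_false]
        have hbr : bLoop str1 n j (max k Len) k
            = bLoop str1 n (j + 1) (max (max k Len) 1) 1 := by
          rw [bLoop_eq, if_pos hjn]
          simp only [hg2, Bool.false_eq_true, if_false]
        have hmax : max (max Len k) 1 = max (max k Len) 1 := by omega
        rw [h1, h2, HM j (max k Len) k (by omega) hj hc', hbl, hbr, hmax]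
    · rw [gE_eq, if_neg hjn, bLoop_eq, if_neg hjn,
          lsGo_stop str1 n F (j - 1 + 1) _ (by omega)]
      have hk : j - 1 - j + k + 1 = k := by omega
      rw [hk, max_comm]

-- main invariant: at a streak start (i = 0 or the chain broke at i) the two loops agree,
-- whatever B's incoming counter is
theorem main_inv (str1 : String) (n : Int) :
    ∀ (F : Nat) (i Len c : Int), (n - i).toNat ≤ F → 0 ≤ i →
      (i = 0 ∨ cnd str1 i = false ∨ n ≤ i) →
      largestSubstr1Go str1 n F i Len = bLoop str1 n i Len c := by
  intro F
  induction F with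
  | zero =>
    intro i Len c hF hi _
    rw [lsGo_stop str1 n 0 i Len (by omega), bLoop_eq, if_neg (by omega)]
  | succ F ih =>
    intro i Len c hF hi hreset
    by_cases hin : i < n
    · have hguard : (decide (0 < i) && cnd str1 i) = false := by
        rcases hreset with h0 | hc | hn
        · simp [h0]
        · simp [hc]
        · exact absurd hin (by omega)
      have HM : ∀ (j Len c : Int), (n - j).toNat ≤ F → 0 < j → cnd str1 j = false →
          largestSubstr1Go str1 n F j Len = bLoop str1 n j Len c := by
        intro j Len c hj hj0 hc
        exact ih j Len c hj (by omega) (Or.inr (Or.inl hc))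
      have hstep : largestSubstr1Go str1 n (F + 1) i Len
          = largestSubstr1Go str1 n F (gE str1 n (i + 1) + 1)
              (max (gE str1 n (i + 1) - i + 1) Len) := by
        simp only [largestSubstr1Go, hin, if_true, getEndingIndex_eq_gE]
      rw [hstep, bLoop_eq, if_pos hin]
      simp only [hguard, Bool.false_eq_true, if_false]
      rw [inner str1 n F HM F (i + 1) 1 Len le_rfl (by omega) (by omega)]
      have harg : gE str1 n (i + 1) - (i + 1) + 1 + 1
          = gE str1 n (i + 1) - i + 1 := by omega
      rw [harg]
    · rw [lsGo_stop str1 n (F + 1) i Len hin, bLoop_eq, if_neg hin]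

-- ===== VERDICT (by name: the statement is the Claim_ definition above) =====
theorem largestSubstr1_spec : Claim_equal_largestSubstr1 := by
  intro str1 n _ _
  unfold Spec_largestSubstr1 largestSubstr1 largestSubstr1_alt
  rw [foldl_bStep_eq str1 n n.toNat 0 0 0 (by omega)]
  exact main_inv str1 n n.toNat 0 0 0 (by omega) le_rfl (Or.inl rfl)
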